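-- pv_equiv track=rewrite | github.com/BorisTyshkevich/rtve-dl | src/rtve_dl/workflows/download.py | _expand_reset_layers
-- ===== SOURCE A (Python) =====
-- def _expand_reset_layers(user_layers: set[str]) -> set[str]:
--     expanded = set(user_layers)
--     changed = True
--     while changed:
--         changed = False
--         prev = set(expanded)
--         if "video" in expanded:
--             expanded.update({"subs-es", "subs-en", "subs-ru", "subs-refs", "mkv"})
--         if "subs-es" in expanded:
--             expanded.update({"subs-en", "subs-ru", "subs-refs", "mkv"})
--         if "subs-en" in expanded:
--             expanded.add("mkv")
--         if "subs-ru" in expanded: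
--             expanded.add("mkv")
--         if "subs-refs" in expanded:
--             expanded.add("mkv")
--         changed = expanded != prev
--     return expanded
-- ===== SOURCE B (Python) =====
-- # Table-driven single pass: the dependency graph is a fixed DAG listed in
-- # topological order, so one ordered sweep over the closure table suffices.
-- _CLOSURE = [
--     ("video", ("subs-es", "subs-en", "subs-ru", "subs-refs", "mkv")),
--     ("subs-es", ("subs-en", "subs-ru", "subs-refs", "mkv")),
--     ("subs-en", ("mkv",)),
--     ("subs-ru", ("mkv",)),
--     ("subs-refs", ("mkv",)),
-- ]
--
--
-- def _expand_reset_layers(user_layers: set[str]) -> set[str]: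
--     expanded = set(user_layers)
--     for layer, deps in _CLOSURE:
--         if layer in expanded:
--             expanded.update(deps)
--     return expanded
-- ===== Notes on version B (the rewrite author's own statement) =====
-- stated objective: simpler
-- what changed: Replaces the while-loop fixed-point iteration with a single table-driven pass over an explicit closure table listed in topological order of the fixed dependency DAG.
import Mathlib
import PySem

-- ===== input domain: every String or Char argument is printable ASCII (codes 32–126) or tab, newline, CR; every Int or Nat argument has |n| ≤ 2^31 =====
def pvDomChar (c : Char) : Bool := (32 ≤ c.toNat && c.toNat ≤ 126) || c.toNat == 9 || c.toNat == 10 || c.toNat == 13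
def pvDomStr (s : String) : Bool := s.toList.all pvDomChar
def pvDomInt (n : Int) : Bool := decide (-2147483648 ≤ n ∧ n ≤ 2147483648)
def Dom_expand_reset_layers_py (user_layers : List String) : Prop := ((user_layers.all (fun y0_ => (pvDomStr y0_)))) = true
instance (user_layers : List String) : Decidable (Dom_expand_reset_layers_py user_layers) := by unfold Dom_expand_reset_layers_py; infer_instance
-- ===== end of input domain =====

-- B replaces A's while-loop fixed point by one table-driven pass over the dependency
-- DAG in topological order (objective: simpler). Equal as lists on all inputs.

-- ===== PORT A =====
-- The five statements of A's while-loop body, one definition per 'if'.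
def pvStep1 (e : PySem.Set String) : PySem.Set String :=
  if PySem.Set.contains e "video" then
    PySem.Set.update e ["subs-es", "subs-en", "subs-ru", "subs-refs", "mkv"] else e
def pvStep2 (e : PySem.Set String) : PySem.Set String :=
  if PySem.Set.contains e "subs-es" then
    PySem.Set.update e ["subs-en", "subs-ru", "subs-refs", "mkv"] else e
def pvStep3 (e : PySem.Set String) : PySem.Set String :=
  if PySem.Set.contains e "subs-en" then PySem.Set.add e "mkv" else e
def pvStep4 (e : PySem.Set String) : PySem.Set String :=
  if PySem.Set.contains e "subs-ru" then PySem.Set.add e "mkv" else e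
def pvStep5 (e : PySem.Set String) : PySem.Set String :=
  if PySem.Set.contains e "subs-refs" then PySem.Set.add e "mkv" else e

-- One iteration of A's loop body, the five checks in order.
def pvPassA (expanded : PySem.Set String) : PySem.Set String :=
  pvStep5 (pvStep4 (pvStep3 (pvStep2 (pvStep1 expanded))))

-- A's 'while changed' loop; the set can grow at most 5 times, so fuel 7 is a
-- totality guard only (never exhausted on the real control flow).
def pvLoopA (fuel : Nat) (expanded : PySem.Set String) : PySem.Set String :=
  match fuel with
  | 0 => expanded
  | Nat.succ fuel =>
      let prev := expanded
      let e := pvPassA expanded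
      if e = prev then e else pvLoopA fuel e

def expand_reset_layers_py (user_layers : List String) : List String :=
  pvLoopA 7 (PySem.Set.ofList user_layers)

-- ===== PORT B =====
-- The closure table _CLOSURE of Source B, in topological order.
def pvClosureTable : List (String × List String) :=
  [("video", ["subs-es", "subs-en", "subs-ru", "subs-refs", "mkv"]),
   ("subs-es", ["subs-en", "subs-ru", "subs-refs", "mkv"]),
   ("subs-en", ["mkv"]),
   ("subs-ru", ["mkv"]),
   ("subs-refs", ["mkv"])]

def expand_reset_layers_py_alt (user_layers : List String) : List String :=
  pvClosureTable.foldl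
    (fun expanded p =>
      if PySem.Set.contains expanded p.1 then PySem.Set.update expanded p.2 else expanded)
    (PySem.Set.ofList user_layers)

-- ===== PRECONDITION & SPEC =====
def Spec_expand_reset_layers_py (user_layers : List String) (out : List String) : Prop := out = expand_reset_layers_py_alt user_layers
instance (user_layers : List String) (out : List String) : Decidable (Spec_expand_reset_layers_py user_layers out) := by unfold Spec_expand_reset_layers_py; infer_instance

-- ===== CLAIM (what is proved, stated in full; the proofs are below) =====
def Claim_equal_expand_reset_layers_py : Prop := ∀ (user_layers : List String), Dom_expand_reset_layers_py user_layers → Spec_expand_reset_layers_py user_layers (expand_reset_layers_py user_layers)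

-- ===== LEMMAS AND PROOFS =====

-- B's fold over the literal table is exactly one pass of A's loop body.
lemma alt_eq_pass (u : List String) :
    expand_reset_layers_py_alt u = pvPassA (PySem.Set.ofList u) := by
  simp [expand_reset_layers_py_alt, pvClosureTable, pvPassA,
        pvStep1, pvStep2, pvStep3, pvStep4, pvStep5, List.foldl]

lemma update_of_subset (s : PySem.Set String) (xs : List String)
    (h : ∀ x ∈ xs, x ∈ s) : PySem.Set.update s xs = s := by
  rw [PySem.Set.update_eq_append_filter]
  have hf : List.filter (fun y => !(PySem.Set.contains s y)) (PySem.Set.ofList xs) = [] := by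
    rw [List.filter_eq_nil_iff]
    intro a ha
    have hm : a ∈ s := h a ((PySem.Set.mem_ofList xs a).mp ha)
    simpa using hm
  rw [hf, List.append_nil]

-- Membership in a step's result, as a propositional formula.
lemma mem_step1 (e : PySem.Set String) (x : String) :
    x ∈ pvStep1 e ↔ x ∈ e ∨ ("video" ∈ e ∧ x ∈ (["subs-es", "subs-en", "subs-ru", "subs-refs", "mkv"] : List String)) := by
  unfold pvStep1; split_ifs with h <;> simp_all [PySem.Set.mem_update] <;> tauto

lemma mem_step2 (e : PySem.Set String) (x : String) :
    x ∈ pvStep2 e ↔ x ∈ e ∨ ("subs-es" ∈ e ∧ x ∈ (["subs-en", "subs-ru", "subs-refs", "mkv"] : List String)) := by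
  unfold pvStep2; split_ifs with h <;> simp_all [PySem.Set.mem_update] <;> tauto

lemma mem_step3 (e : PySem.Set String) (x : String) :
    x ∈ pvStep3 e ↔ x ∈ e ∨ ("subs-en" ∈ e ∧ x = "mkv") := by
  unfold pvStep3; split_ifs with h <;> simp_all [PySem.Set.mem_add]

lemma mem_step4 (e : PySem.Set String) (x : String) :
    x ∈ pvStep4 e ↔ x ∈ e ∨ ("subs-ru" ∈ e ∧ x = "mkv") := by
  unfold pvStep4; split_ifs with h <;> simp_all [PySem.Set.mem_add]

lemma mem_step5 (e : PySem.Set String) (x : String) :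
    x ∈ pvStep5 e ↔ x ∈ e ∨ ("subs-refs" ∈ e ∧ x = "mkv") := by
  unfold pvStep5; split_ifs with h <;> simp_all [PySem.Set.mem_add]

-- A set closed under the dependency rules is a fixed point of the pass.
lemma pass_of_closed (t : PySem.Set String)
    (hv : "video" ∈ t → ("subs-es" ∈ t ∧ "subs-en" ∈ t ∧ "subs-ru" ∈ t ∧ "subs-refs" ∈ t ∧ "mkv" ∈ t))
    (hes : "subs-es" ∈ t → ("subs-en" ∈ t ∧ "subs-ru" ∈ t ∧ "subs-refs" ∈ t ∧ "mkv" ∈ t))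
    (hen : "subs-en" ∈ t → "mkv" ∈ t)
    (hru : "subs-ru" ∈ t → "mkv" ∈ t)
    (hrefs : "subs-refs" ∈ t → "mkv" ∈ t) :
    pvPassA t = t := by
  have e1 : pvStep1 t = t := by
    unfold pvStep1; split_ifs with h
    · rcases hv ((PySem.Set.contains_iff t _).mp h) with ⟨a, b, c, d, e⟩
      apply update_of_subset; intro x hx; fin_cases hx <;> assumption
    · rfl
  have e2 : pvStep2 t = t := by
    unfold pvStep2; split_ifs with h
    · rcases hes ((PySem.Set.contains_iff t _).mp h) with ⟨a, b, c, d⟩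
      apply update_of_subset; intro x hx; fin_cases hx <;> assumption
    · rfl
  have e3 : pvStep3 t = t := by
    unfold pvStep3; split_ifs with h
    · exact PySem.Set.add_of_mem (hen ((PySem.Set.contains_iff t _).mp h))
    · rfl
  have e4 : pvStep4 t = t := by
    unfold pvStep4; split_ifs with h
    · exact PySem.Set.add_of_mem (hru ((PySem.Set.contains_iff t _).mp h))
    · rfl
  have e5 : pvStep5 t = t := by
    unfold pvStep5; split_ifs with h
    · exact PySem.Set.add_of_mem (hrefs ((PySem.Set.contains_iff t _).mp h))
    · rfl
  unfold pvPassA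
  rw [e1, e2, e3, e4, e5]

-- One pass already produces a closed set, hence the pass is idempotent.
lemma pass_idem (s : PySem.Set String) : pvPassA (pvPassA s) = pvPassA s := by
  apply pass_of_closed <;>
    · simp only [pvPassA, mem_step1, mem_step2, mem_step3, mem_step4, mem_step5,
        List.mem_cons, List.not_mem_nil, String.reduceEq, and_false, or_false,
        false_or, and_true, or_self]
      tauto

-- ===== VERDICT (by name: the statement is the Claim_ definition above) =====
theorem expand_reset_layers_py_spec : Claim_equal_expand_reset_layers_py := by
  intro u _
  unfold Spec_expand_reset_layers_py
  rw [alt_eq_pass]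
  show pvLoopA 7 (PySem.Set.ofList u) = pvPassA (PySem.Set.ofList u)
  set s := PySem.Set.ofList u
  simp only [pvLoopA]
  by_cases h : pvPassA s = s
  · simp [h]
  · simp [h, pass_idem]
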